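-- pv_equiv track=rewrite | github.com/pevescarol/censor-dispenser-challenge | censor_dispenser.py | censor_word
-- ===== SOURCE A (Python) =====
-- def censor_word(text, censor):
--   censored = ""
--   for i in range(len(censor)):
--     if censor[i] == " ":
--       censored = censored + " "
--     else:
--     	censored = censored + "#"
--   return text.replace(censor, censored)
-- ===== SOURCE B (Python) =====
-- def censor_word(text, censor):
--   censored = " ".join("#" * len(tok) for tok in censor.split(" "))
--   return text.replace(censor, censored)
-- ===== Notes on version B (the rewrite author's own statement) =====
-- stated objective: simpler
-- what changed: Replaces the per-character accumulation loop over range(len(censor)) with a tokenize-mask-rejoin pass: split censor on ' ', mask each token with '#'*len(token), join with ' '.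
import Mathlib
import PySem

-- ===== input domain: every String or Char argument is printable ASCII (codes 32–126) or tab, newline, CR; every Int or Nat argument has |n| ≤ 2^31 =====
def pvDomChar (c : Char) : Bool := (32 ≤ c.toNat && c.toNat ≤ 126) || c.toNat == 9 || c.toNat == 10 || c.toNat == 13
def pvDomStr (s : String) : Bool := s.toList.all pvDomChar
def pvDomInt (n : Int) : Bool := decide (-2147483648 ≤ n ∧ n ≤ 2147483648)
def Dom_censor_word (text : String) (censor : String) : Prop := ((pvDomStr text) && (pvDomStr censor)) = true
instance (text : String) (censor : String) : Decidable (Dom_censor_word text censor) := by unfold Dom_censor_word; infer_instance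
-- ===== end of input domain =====

-- B builds the mask by splitting the censor on ' ', masking each token with '#'×len, and
-- rejoining with ' ' — a tokenize-mask-rejoin pass instead of A's per-character loop (simpler).


-- ===== PORT A =====
-- for i in range(len(censor)): censored += " " if censor[i] == " " else "#"; text.replace(censor, censored)
def censor_word (text : String) (censor : String) : String :=
  PySem.Str.replace text censor
    ((PySem.List.pyRange 0 (PySem.Str.len censor : Int)).foldl
      (fun acc i =>
        if PySem.Str.pyGet? censor i = some ' ' then acc ++ " " else acc ++ "#") "")

-- ===== PORT B =====
-- censored = " ".join("#" * len(tok) for tok in censor.split(" ")); text.replace(censor, censored)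
def censor_word_alt (text : String) (censor : String) : String :=
  PySem.Str.replace text censor
    (String.ofList (PySem.Chars.join [' ']
      ((PySem.Chars.splitOn censor.toList [' ']).map (fun t => List.replicate t.length '#'))))

-- ===== PRECONDITION & SPEC =====
def Spec_censor_word (text : String) (censor : String) (out : String) : Prop := out = censor_word_alt text censor
instance (text : String) (censor : String) (out : String) : Decidable (Spec_censor_word text censor out) := by unfold Spec_censor_word; infer_instance

-- ===== CLAIM (what is proved, stated in full; the proofs are below) =====
def Claim_equal_censor_word : Prop := ∀ (text : String) (censor : String), Dom_censor_word text censor → Spec_censor_word text censor (censor_word text censor)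

-- ===== LEMMAS AND PROOFS =====

/-- A's per-character mask. -/
def pvMask (c : Char) : Char := if c = ' ' then ' ' else '#'

/-- Structural description of Python's `split(" ")` on a char list. -/
def pvSp : List Char → List (List Char)
  | [] => [[]]
  | c :: rest => if c = ' ' then [] :: pvSp rest else (pvSp rest).modifyHead (c :: ·)

lemma pvSp_ne_nil : ∀ l : List Char, pvSp l ≠ []
  | [] => by simp [pvSp]
  | c :: rest => by
    simp only [pvSp]
    split_ifs
    · simp
    · cases h : pvSp rest with
      | nil => exact absurd h (pvSp_ne_nil rest)
      | cons p t => simp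

lemma pvGo_spec (l : List Char) : ∀ (fuel : Nat) (cur : List Char) (acc : List (List Char)),
    l.length < fuel →
    PySem.Chars.splitOn.go [' '] fuel l cur acc
      = acc.reverse ++ (pvSp l).modifyHead (cur.reverse ++ ·) := by
  induction l with
  | nil =>
    intro fuel cur acc h
    match fuel with
    | f + 1 => simp [PySem.Chars.splitOn.go, pvSp]
  | cons c rest ih =>
    intro fuel cur acc h
    match fuel with
    | f + 1 =>
      by_cases hc : c = ' '
      · subst hc
        have hstep : PySem.Chars.splitOn.go [' '] (f+1) (' ' :: rest) cur acc
            = PySem.Chars.splitOn.go [' '] f rest [] (cur.reverse :: acc) := by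
          simp [PySem.Chars.splitOn.go, List.isPrefixOf]
        rw [hstep, ih f [] (cur.reverse :: acc) (by simpa using Nat.lt_of_succ_lt_succ h)]
        have hs : pvSp (' ' :: rest) = [] :: pvSp rest := by simp [pvSp]
        rw [hs]
        cases h' : pvSp rest <;> simp [List.modifyHead]
      · have hstep : PySem.Chars.splitOn.go [' '] (f+1) (c :: rest) cur acc
            = PySem.Chars.splitOn.go [' '] f rest (c :: cur) acc := by
          simp [PySem.Chars.splitOn.go, List.isPrefixOf, Ne.symm hc]
        rw [hstep, ih f (c :: cur) acc (by simpa using Nat.lt_of_succ_lt_succ h)]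
        simp only [pvSp, if_neg hc]
        cases h' : pvSp rest with
        | nil => exact absurd h' (pvSp_ne_nil rest)
        | cons p t => simp [List.modifyHead]

lemma pvSplitOn_eq (l : List Char) : PySem.Chars.splitOn l [' '] = pvSp l := by
  have h := pvGo_spec l (l.length + 1) [] [] (Nat.lt_succ_self _)
  simp only [PySem.Chars.splitOn, h, List.reverse_nil, List.nil_append]
  cases h' : pvSp l with
  | nil => exact absurd h' (pvSp_ne_nil l)
  | cons p t => simp [List.modifyHead]

lemma pvJoin_cons_head (sep : List Char) (x : Char) (p : List Char) (t : List (List Char)) :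
    PySem.Chars.join sep ((x :: p) :: t) = x :: PySem.Chars.join sep (p :: t) := by
  cases t with
  | nil => simp [PySem.Chars.join_singleton]
  | cons q r => simp [PySem.Chars.join_cons_cons]

/-- The tokenize-mask-rejoin pass computes exactly the per-character mask. -/
lemma pvMask_join (l : List Char) :
    PySem.Chars.join [' '] ((pvSp l).map (fun t => List.replicate t.length '#'))
      = l.map pvMask := by
  induction l with
  | nil => simp [pvSp, PySem.Chars.join_singleton]
  | cons c rest ih =>
    by_cases hc : c = ' '
    · have hs : pvSp (c :: rest) = [] :: pvSp rest := by simp [pvSp, hc]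
      rw [hs]
      cases h' : pvSp rest with
      | nil => exact absurd h' (pvSp_ne_nil rest)
      | cons p t =>
        rw [h'] at ih
        simp only [List.map_cons] at ih ⊢
        rw [PySem.Chars.join_cons_cons, ih]
        simp [pvMask, hc]
    · simp only [pvSp, if_neg hc]
      cases h' : pvSp rest with
      | nil => exact absurd h' (pvSp_ne_nil rest)
      | cons p t =>
        rw [h'] at ih
        simp only [List.modifyHead, List.map_cons, List.length_cons,
          List.replicate_succ] at ih ⊢
        rw [pvJoin_cons_head, ih]
        simp [pvMask, hc]

/-- A's index loop builds the mask of the first `n` characters. -/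
lemma pvLoopA (s : String) (n : Nat) (hn : n ≤ s.toList.length) (acc : String) :
    (PySem.List.pyRange 0 (n : Int)).foldl
      (fun acc i =>
        if PySem.Str.pyGet? s i = some ' ' then acc ++ " " else acc ++ "#") acc
    = acc ++ String.ofList ((s.toList.take n).map pvMask) := by
  induction n generalizing acc with
  | zero =>
    rw [← String.toList_inj]
    simp [PySem.List.pyRange]
  | succ m ih =>
    have hm : m ≤ s.toList.length := Nat.le_of_succ_le hn
    have hsplit : PySem.List.pyRange 0 ((m + 1 : Nat) : Int)
        = PySem.List.pyRange 0 (m : Int) ++ PySem.List.pyRange (m : Int) ((m + 1 : Nat) : Int) :=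
      PySem.List.pyRange_one_append 0 (m : Int) ((m + 1 : Nat) : Int)
        (by exact_mod_cast Nat.zero_le m) (by push_cast; omega)
    have hone : PySem.List.pyRange (m : Int) ((m + 1 : Nat) : Int) = [(m : Int)] := by
      have h1 : ((m + 1 : Nat) : Int) = (m : Int) + 1 := by push_cast; ring
      rw [h1, PySem.List.pyRange_one_cons (by omega)]
      simp [PySem.List.pyRange]
    rw [hsplit, hone, List.foldl_append, ih hm]
    have hget : PySem.Str.pyGet? s (m : Int) = s.toList[m]? := by simp
    have hlt : m < s.toList.length := hn
    have htake : s.toList.take (m + 1) = s.toList.take m ++ [s.toList[m]] :=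
      List.take_succ_eq_append_getElem hlt
    rw [List.foldl_cons, List.foldl_nil, hget, List.getElem?_eq_getElem hlt, htake]
    by_cases hc : s.toList[m] = ' '
    · rw [← String.toList_inj]
      simp [hc, pvMask]
    · have hns : ¬ (some s.toList[m] = some ' ') := by simpa using hc
      rw [if_neg hns, ← String.toList_inj]
      simp only [String.toList_append, String.toList_ofList]
      simp only [List.map_append, List.map_cons, List.map_nil]
      simp [pvMask, hc]

-- ===== VERDICT (by name: the statement is the Claim_ definition above) =====
theorem censor_word_spec : Claim_equal_censor_word := by
  intro text censor _
  show censor_word text censor = censor_word_alt text censor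
  unfold censor_word censor_word_alt
  rw [pvSplitOn_eq, pvMask_join]
  have hlen : PySem.Str.len censor = censor.toList.length := by
    simp [PySem.Str.len]
  rw [hlen, pvLoopA censor censor.toList.length (le_refl _) ""]
  rw [← String.toList_inj]
  simp [List.take_of_length_le]
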